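-- pv_equiv track=rewrite | github.com/canvas-gamification/canvas-gamification | weight_calculator.py | validate_grades_and_ranges
-- ===== SOURCE A (Python) =====
-- def validate_rages(ranges):
--     """
--     Validates if weight ranges are feasible
--
--     :param ranges: dict
--     {
--         "assignment_name": [minimum_percentage, maximum_percentage]
--     }
--     :return: True if its feasible else False
--     """
--
--     min_possible = 0
--     max_possible = 0
--
--     for assignment, range_item in ranges.items():
--         if range_item[1] < range_item[0]:
--             return False
--         min_possible += range_item[0]
--         max_possible += range_item[1]
--
--     return min_possible <= 100 <= max_possible
--
-- def validate_grades_and_ranges(grades, ranges):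
--     """
--     This function validates grades and ranges to check if they are feasible
--     and the assignments are identical in grades and ranges
--
--     :param grades: dict
--     {
--         "assignment_name": [grade1, grade2, ...]
--     }
--     :param ranges: dict
--     {
--         "assignment_name": [minimum_percentage, maximum_percentage]
--     }
--     :return: True if grades and ranges are valid else False
--     """
--
--     if not validate_rages(ranges):
--         return False
--
--     for assignment, grade in grades.items():
--         if assignment not in ranges:
--             return False
--
--     for assignment, range_item in ranges.items():
--         if assignment not in grades:
--             return False
--     return True
-- ===== SOURCE B (Python) =====
-- def validate_grades_and_ranges(grades, ranges):
--     def totals(vals):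
--         # None if some range is inverted; otherwise (sum of mins, sum of maxes),
--         # built back-to-front by recursion
--         if not vals:
--             return (0, 0)
--         head = vals[0]
--         if head[1] < head[0]:
--             return None
--         rest = totals(vals[1:])
--         if rest is None:
--             return None
--         return (head[0] + rest[0], head[1] + rest[1])
--
--     t = totals(list(ranges.values()))
--     if t is None or not (t[0] <= 100 <= t[1]):
--         return False
--     # dict keys are unique, so sorted key lists are equal iff the key sets coincide
--     return sorted(grades) == sorted(ranges)
-- ===== Notes on version B (the rewrite author's own statement) =====
-- stated objective: alternative
-- what changed: Feasibility is computed by a back-to-front recursion returning optional (min,max) totals instead of A's forward accumulator loop with early returns, and the two key-membership loops are replaced by a sort-then-compare of the key lists.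
import Mathlib
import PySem

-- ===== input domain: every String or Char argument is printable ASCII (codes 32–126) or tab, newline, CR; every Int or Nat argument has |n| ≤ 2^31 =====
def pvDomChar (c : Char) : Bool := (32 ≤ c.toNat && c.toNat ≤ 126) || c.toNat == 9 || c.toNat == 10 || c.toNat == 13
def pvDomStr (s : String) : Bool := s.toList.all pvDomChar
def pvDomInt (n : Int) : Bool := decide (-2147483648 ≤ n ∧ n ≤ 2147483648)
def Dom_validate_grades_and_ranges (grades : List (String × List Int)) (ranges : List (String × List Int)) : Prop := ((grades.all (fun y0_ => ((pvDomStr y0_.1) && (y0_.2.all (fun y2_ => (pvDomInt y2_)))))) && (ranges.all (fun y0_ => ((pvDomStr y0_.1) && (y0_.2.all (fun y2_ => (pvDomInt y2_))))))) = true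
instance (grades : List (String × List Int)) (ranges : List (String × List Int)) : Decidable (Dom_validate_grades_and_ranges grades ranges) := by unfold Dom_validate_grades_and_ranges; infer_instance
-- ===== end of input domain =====

-- B computes feasibility by a back-to-front recursion returning optional (min,max) totals instead
-- of A's forward accumulator loop with early returns, and replaces A's two key-membership loops
-- by comparing the sorted key lists (alternative decomposition, similar cost).


-- ===== PORT A =====
-- helper validate_rages: forward accumulator loop over ranges.items() with early return;
-- r[1]/r[0] via pyGet? — the `| _, _ => false` arm is Python's IndexError (outside Pre_)
def pvValidateRages : List (String × List Int) → Int → Int → Bool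
  | [], min_possible, max_possible => decide (min_possible ≤ 100 ∧ 100 ≤ max_possible)
  | (_, range_item) :: rest, min_possible, max_possible =>
    match PySem.List.pyGet? range_item 1, PySem.List.pyGet? range_item 0 with
    | some r1, some r0 =>
      if r1 < r0 then false
      else pvValidateRages rest (min_possible + r0) (max_possible + r1)
    | _, _ => false

-- first loop: for assignment in grades: if assignment not in ranges: return False
def pvGradesLoop : List (String × List Int) → List (String × List Int) → Bool
  | [], _ => true
  | (assignment, _) :: rest, ranges =>
    if !(ranges.any (fun q => q.1 == assignment)) then false
    else pvGradesLoop rest ranges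

-- second loop: for assignment in ranges: if assignment not in grades: return False
def pvRangesLoop : List (String × List Int) → List (String × List Int) → Bool
  | [], _ => true
  | (assignment, _) :: rest, grades =>
    if !(grades.any (fun p => p.1 == assignment)) then false
    else pvRangesLoop rest grades

def validate_grades_and_ranges (grades : List (String × List Int)) (ranges : List (String × List Int)) : Bool :=
  if !(pvValidateRages ranges 0 0) then false
  else if !(pvGradesLoop grades ranges) then false
  else if !(pvRangesLoop ranges grades) then false
  else true

-- ===== PORT B =====
-- Source B's totals: head-checked recursion, sums assembled back-to-front on return.
-- head[1]/head[0] via pyGetD 0 — exact where the index is in range, i.e. on all of Pre_.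
def pvTotals : List (List Int) → Option (Int × Int)
  | [] => some (0, 0)
  | head :: rest =>
    if PySem.List.pyGetD head 1 0 < PySem.List.pyGetD head 0 0 then none
    else
      match pvTotals rest with
      | none => none
      | some (lo, hi) => some (PySem.List.pyGetD head 0 0 + lo, PySem.List.pyGetD head 1 0 + hi)

def validate_grades_and_ranges_alt (grades : List (String × List Int)) (ranges : List (String × List Int)) : Bool :=
  match pvTotals (ranges.map Prod.snd) with
  | none => false
  | some (lo, hi) =>
    if !(decide (lo ≤ 100 ∧ 100 ≤ hi)) then false
    else decide (PySem.List.sorted (grades.map Prod.fst) (fun x => x) false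
               = PySem.List.sorted (ranges.map Prod.fst) (fun x => x) false)

-- ===== PRECONDITION & SPEC =====
-- Both A and B raise IndexError at the first ranges value with fewer than 2 entries, unless an
-- earlier value already had max < min (then both return False first); Pre_ admits exactly the
-- inputs where that indexing is never reached or always in range. Pre_ also requires the key
-- lists to be duplicate-free: the arguments model Python dicts, whose keys are always unique,
-- so no actual Python input is excluded by this.
def Pre_validate_grades_and_ranges (grades : List (String × List Int)) (ranges : List (String × List Int)) : Prop :=
  (grades.map Prod.fst).Nodup ∧ (ranges.map Prod.fst).Nodup ∧
  ∀ i, (h : i < ranges.length) → ranges[i].2.length < 2 →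
    ∃ j, ∃ hj : j < ranges.length, j < i ∧ 2 ≤ ranges[j].2.length ∧
      ranges[j].2.getD 1 0 < ranges[j].2.getD 0 0
instance (grades : List (String × List Int)) (ranges : List (String × List Int)) : Decidable (Pre_validate_grades_and_ranges grades ranges) := by unfold Pre_validate_grades_and_ranges; infer_instance
def pvWitness_validate_grades_and_ranges : (List (String × List Int)) × (List (String × List Int)) :=
  ([("hw", [90, 80])], [("hw", [30, 110])])

def Spec_validate_grades_and_ranges (grades : List (String × List Int)) (ranges : List (String × List Int)) (out : Bool) : Prop := out = validate_grades_and_ranges_alt grades ranges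
instance (grades : List (String × List Int)) (ranges : List (String × List Int)) (out : Bool) : Decidable (Spec_validate_grades_and_ranges grades ranges out) := by unfold Spec_validate_grades_and_ranges; infer_instance

-- ===== CLAIM (what is proved, stated in full; the proofs are below) =====
def Claim_equal_validate_grades_and_ranges : Prop := ∀ (grades : List (String × List Int)) (ranges : List (String × List Int)), Dom_validate_grades_and_ranges grades ranges → Pre_validate_grades_and_ranges grades ranges → Spec_validate_grades_and_ranges grades ranges (validate_grades_and_ranges grades ranges)

-- ===== LEMMAS AND PROOFS =====

-- A's accumulator loop equals B's back-to-front totals recursion, for any accumulator values,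
-- under Pre_'s shape condition.
theorem pvRages_eq_totals (r : List (String × List Int))
    (hpre : ∀ i, (h : i < r.length) → r[i].2.length < 2 →
      ∃ j, ∃ hj : j < r.length, j < i ∧ 2 ≤ r[j].2.length ∧ r[j].2.getD 1 0 < r[j].2.getD 0 0) :
    ∀ mn mx : Int, pvValidateRages r mn mx =
      match pvTotals (r.map Prod.snd) with
      | none => false
      | some (lo, hi) => decide (mn + lo ≤ 100 ∧ 100 ≤ mx + hi) := by
  induction r with
  | nil => intro mn mx; simp [pvValidateRages, pvTotals]
  | cons hd tl ih =>
    intro mn mx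
    obtain ⟨a, ri⟩ := hd
    have hlen : 2 ≤ ri.length := by
      by_contra hlt
      obtain ⟨j, hj, hj0, _, _⟩ := hpre 0 (by simp) (by simpa using by omega)
      omega
    have h1 : PySem.List.pyGet? ri 1 = some (ri.getD 1 0) := by
      have := PySem.List.pyGet?_natCast (xs := ri) (n := 1)
      simp only [Nat.cast_one] at this
      rw [this, List.getD_eq_getElem?_getD]
      simp [List.getElem?_eq_getElem (by omega : 1 < ri.length)]
    have h0 : PySem.List.pyGet? ri 0 = some (ri.getD 0 0) := by
      have := PySem.List.pyGet?_natCast (xs := ri) (n := 0)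
      simp only [Nat.cast_zero] at this
      rw [this, List.getD_eq_getElem?_getD]
      simp [List.getElem?_eq_getElem (by omega : 0 < ri.length)]
    simp only [pvValidateRages, h0, h1, List.map_cons, pvTotals, PySem.List.pyGetD_ofNat']
    by_cases hbad : ri.getD 1 0 < ri.getD 0 0
    · rw [if_pos hbad, if_pos hbad]
    · have hpre' : ∀ i, (h : i < tl.length) → tl[i].2.length < 2 →
          ∃ j, ∃ hj : j < tl.length, j < i ∧ 2 ≤ tl[j].2.length ∧ tl[j].2.getD 1 0 < tl[j].2.getD 0 0 := by
        intro i hi hshort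
        obtain ⟨j, hj, hji, hjlen, hjbad⟩ := hpre (i+1) (by simpa using Nat.succ_lt_succ hi) (by simpa using hshort)
        match j, hj with
        | 0, _ => exact absurd (by simpa using hjbad) hbad
        | j'+1, hj =>
          exact ⟨j', by simpa using Nat.lt_of_succ_lt_succ hj, by omega,
            by simpa using hjlen, by simpa using hjbad⟩
      rw [if_neg hbad, if_neg hbad, ih hpre' (mn + ri.getD 0 0) (mx + ri.getD 1 0)]
      cases htl : pvTotals (tl.map Prod.snd) with
      | none => rfl
      | some p =>
        obtain ⟨lo, hi⟩ := p
        simp only [decide_eq_decide]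
        constructor
        · rintro ⟨hA, hB⟩; exact ⟨by linarith, by linarith⟩
        · rintro ⟨hA, hB⟩; exact ⟨by linarith, by linarith⟩

theorem pvGradesLoop_eq (g r : List (String × List Int)) :
    pvGradesLoop g r = g.all (fun p => r.any (fun q => q.1 == p.1)) := by
  induction g with
  | nil => simp [pvGradesLoop]
  | cons hd tl ih =>
    obtain ⟨a, v⟩ := hd
    by_cases h : r.any (fun q => q.1 == a) <;> simp [pvGradesLoop, h, ih]

theorem pvRangesLoop_eq (r g : List (String × List Int)) :
    pvRangesLoop r g = r.all (fun q => g.any (fun p => p.1 == q.1)) := by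
  induction r with
  | nil => simp [pvRangesLoop]
  | cons hd tl ih =>
    obtain ⟨a, v⟩ := hd
    by_cases h : g.any (fun p => p.1 == a) <;> simp [pvRangesLoop, h, ih]

-- mutual key containment equals equality of the sorted key lists, for duplicate-free keys
theorem keys_eq (g r : List (String × List Int))
    (hg : (g.map Prod.fst).Nodup) (hr : (r.map Prod.fst).Nodup) :
    (g.all (fun p => r.any (fun q => q.1 == p.1)) && r.all (fun q => g.any (fun p => p.1 == q.1)))
      = decide (PySem.List.sorted (g.map Prod.fst) (fun x => x) false
              = PySem.List.sorted (r.map Prod.fst) (fun x => x) false) := by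
  rw [Bool.eq_iff_iff]
  simp only [Bool.and_eq_true, List.all_eq_true, List.any_eq_true, beq_iff_eq,
    decide_eq_true_eq, PySem.List.sorted_id_eq_sorted_id_iff_perm,
    List.perm_ext_iff_of_nodup hg hr, List.mem_map]
  constructor
  · rintro ⟨h1, h2⟩ x
    constructor
    · rintro ⟨p, hp, rfl⟩; obtain ⟨q, hq, hq1⟩ := h1 p hp; exact ⟨q, hq, hq1⟩
    · rintro ⟨q, hq, rfl⟩; obtain ⟨p, hp, hp1⟩ := h2 q hq; exact ⟨p, hp, hp1⟩
  · intro h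
    constructor
    · intro p hp; exact (h p.1).1 ⟨p, hp, rfl⟩
    · intro q hq; exact (h q.1).2 ⟨q, hq, rfl⟩

-- ===== VERDICT (by name: the statement is the Claim_ definition above) =====
theorem validate_grades_and_ranges_spec : Claim_equal_validate_grades_and_ranges := by
  intro g r _ hpre
  obtain ⟨hg, hr, hshape⟩ := hpre
  unfold Spec_validate_grades_and_ranges validate_grades_and_ranges validate_grades_and_ranges_alt
  rw [pvRages_eq_totals r hshape 0 0, pvGradesLoop_eq, pvRangesLoop_eq]
  cases ht : pvTotals (r.map Prod.snd) with
  | none => rfl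
  | some p =>
    obtain ⟨lo, hi⟩ := p
    simp only [zero_add]
    by_cases hsum : (lo ≤ 100 ∧ 100 ≤ hi)
    · rw [decide_eq_true hsum]
      simp only [Bool.not_true, Bool.false_eq_true, if_false]
      rw [← keys_eq g r hg hr]
      by_cases h1 : g.all (fun p => r.any (fun q => q.1 == p.1)) <;>
        by_cases h2 : r.all (fun q => g.any (fun p => p.1 == q.1)) <;> simp [h1, h2]
    · rw [decide_eq_false hsum]
      simp
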